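-- pv_equiv track=rewrite | github.com/dpriedel/languagetool_languageserver | ltls_server.py | _convert_offset_to_line_col
-- ===== SOURCE A (Python) =====
-- def _convert_offset_to_line_col(offsets: list[int], offset: int) -> tuple[int, int]:
--     """ just as it says, translate a zero-based offset to a line and column."""
--
--     line: int = 0
--     col: int = 0
--
--     try:
--         while offsets[line] < offset:
--             line += 1
--     except IndexError:
--         pass
--
--     col = offset - offsets[line - 1] if line > 0 else offset + 1
--
--     return (line, col - 1)
-- ===== SOURCE B (Python) =====
-- def _convert_offset_to_line_col(offsets: list[int], offset: int) -> tuple[int, int]: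
--     """ just as it says, translate a zero-based offset to a line and column."""
--     # binary search for the first line-end offset >= offset
--     lo, hi = 0, len(offsets)
--     while lo < hi:
--         mid = (lo + hi) // 2
--         if offsets[mid] < offset:
--             lo = mid + 1
--         else:
--             hi = mid
--     if lo > 0:
--         return (lo, offset - offsets[lo - 1] - 1)
--     return (0, offset)
-- ===== Notes on version B (the rewrite author's own statement) =====
-- stated objective: alternative
-- what changed: Replaces A's linear scan for the first offset >= offset with a hand-written binary search (bisect_left) over the offsets table; Pre_ restricts to sorted (non-decreasing) offsets tables (plus the trivial all-below/all-above cases), the invariant of an offset table, on which the two searches agree.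
-- outside the precondition, e.g. on _convert_offset_to_line_col([5, 1], 3): A returns (0, 3), B returns (2, 1)
import Mathlib
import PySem

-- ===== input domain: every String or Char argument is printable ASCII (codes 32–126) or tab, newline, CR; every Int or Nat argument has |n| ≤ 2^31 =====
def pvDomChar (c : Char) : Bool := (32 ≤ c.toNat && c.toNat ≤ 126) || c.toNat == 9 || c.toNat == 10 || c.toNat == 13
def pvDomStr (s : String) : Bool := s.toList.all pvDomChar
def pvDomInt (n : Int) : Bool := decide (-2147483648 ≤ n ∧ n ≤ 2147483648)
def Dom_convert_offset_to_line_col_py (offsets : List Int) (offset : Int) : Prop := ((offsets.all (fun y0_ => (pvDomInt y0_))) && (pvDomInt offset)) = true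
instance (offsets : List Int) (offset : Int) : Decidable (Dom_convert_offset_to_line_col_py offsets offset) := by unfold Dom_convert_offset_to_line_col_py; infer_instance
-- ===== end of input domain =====

-- B replaces A's linear scan with a binary search; equality is claimed on sorted offsets tables (Pre_).


-- ===== PORT A =====
-- A's try/while loop: advance `line` while offsets[line] < offset; the IndexError at line = len(offsets)
-- stops the loop.  Structural recursion on a fuel bound (fuel = len(offsets) suffices: the loop runs at
-- most len(offsets) iterations); the `line < length` guard is exactly Python's IndexError boundary.
def aScan (offsets : List Int) (offset : Int) : Nat → Nat → Nat
  | line, 0 => line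
  | line, fuel + 1 =>
    if line < offsets.length then
      if offsets.getD line 0 < offset then aScan offsets offset (line + 1) fuel else line
    else line

def convert_offset_to_line_col_py (offsets : List Int) (offset : Int) : Int × Int :=
  let line : Int := (aScan offsets offset 0 offsets.length : Nat)
  -- offsets[line-1] is always in range when line > 0, so getD never supplies its default
  let col : Int := if line > 0 then offset - offsets.getD (line.toNat - 1) 0 else offset + 1
  (line, col - 1)

-- ===== PORT B =====
-- hand-written bisect_left loop of Source B: `while lo < hi`, halving [lo, hi); fuel = len(offsets)
-- suffices since hi - lo shrinks every iteration.
def bSearch (offsets : List Int) (offset : Int) : Nat → Nat → Nat → Nat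
  | lo, _, 0 => lo
  | lo, hi, fuel + 1 =>
    if lo < hi then
      if offsets.getD ((lo + hi) / 2) 0 < offset then
        bSearch offsets offset ((lo + hi) / 2 + 1) hi fuel
      else bSearch offsets offset lo ((lo + hi) / 2) fuel
    else lo

def convert_offset_to_line_col_py_alt (offsets : List Int) (offset : Int) : Int × Int :=
  let lo := bSearch offsets offset 0 offsets.length offsets.length
  if lo > 0 then ((lo : Int), offset - offsets.getD (lo - 1) 0 - 1)
  else (0, offset)

-- ===== PRECONDITION & SPEC =====
-- Pre_ excludes unsorted lists (except trivial ones where offset is below or above every entry), on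
-- which A still returns a value: an offsets table is sorted by construction, and only there do the
-- linear and the binary search agree.
def Pre_convert_offset_to_line_col_py (offsets : List Int) (offset : Int) : Prop :=
  List.Pairwise (· ≤ ·) offsets ∨ (∀ v ∈ offsets, offset ≤ v) ∨ (∀ v ∈ offsets, v < offset)
instance (offsets : List Int) (offset : Int) : Decidable (Pre_convert_offset_to_line_col_py offsets offset) := by unfold Pre_convert_offset_to_line_col_py; infer_instance

def pvWitness_convert_offset_to_line_col_py : List Int × Int := ([0, 5, 10], 7)

def Spec_convert_offset_to_line_col_py (offsets : List Int) (offset : Int) (out : Int × Int) : Prop := out = convert_offset_to_line_col_py_alt offsets offset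
instance (offsets : List Int) (offset : Int) (out : Int × Int) : Decidable (Spec_convert_offset_to_line_col_py offsets offset out) := by unfold Spec_convert_offset_to_line_col_py; infer_instance

-- ===== CLAIM (what is proved, stated in full; the proofs are below) =====
def Claim_equal_convert_offset_to_line_col_py : Prop := ∀ (offsets : List Int) (offset : Int), Dom_convert_offset_to_line_col_py offsets offset → Pre_convert_offset_to_line_col_py offsets offset → Spec_convert_offset_to_line_col_py offsets offset (convert_offset_to_line_col_py offsets offset)

-- ===== LEMMAS AND PROOFS =====

-- aScan's result r: everything scanned before r is < offset, r itself (if in range) is not.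
theorem aScan_spec (offsets : List Int) (offset : Int) :
    ∀ (fuel line : Nat), offsets.length ≤ line + fuel →
    line ≤ aScan offsets offset line fuel ∧ aScan offsets offset line fuel ≤ max line offsets.length ∧
    (∀ i, line ≤ i → i < aScan offsets offset line fuel → offsets.getD i 0 < offset) ∧
    (aScan offsets offset line fuel < offsets.length →
      ¬ offsets.getD (aScan offsets offset line fuel) 0 < offset) := by
  intro fuel
  induction fuel with
  | zero =>
    intro line hf
    simp only [aScan]
    exact ⟨le_refl _, by omega, by omega, by omega⟩
  | succ fuel ih =>
    intro line hf
    simp only [aScan]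
    split_ifs with h1 h2
    · obtain ⟨i1, i2, i3, i4⟩ := ih (line + 1) (by omega)
      refine ⟨by omega, by omega, ?_, i4⟩
      intro i hi1 hi2
      rcases Nat.eq_or_lt_of_le hi1 with rfl | hi
      · exact h2
      · exact i3 i hi hi2
    · exact ⟨le_refl _, by omega, by omega, fun _ => h2⟩
    · exact ⟨le_refl _, by omega, by omega, by omega⟩

-- sortedness as an index fact
theorem sorted_getD {offsets : List Int} (hs : List.Pairwise (· ≤ ·) offsets)
    {i j : Nat} (hij : i ≤ j) (hj : j < offsets.length) :
    offsets.getD i 0 ≤ offsets.getD j 0 := by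
  rcases Nat.eq_or_lt_of_le hij with rfl | h
  · exact le_refl _
  · have := List.pairwise_iff_getElem.mp hs i j (by omega) hj h
    simpa [List.getD_eq_getElem?_getD, List.getElem?_eq_getElem, hj, (by omega : i < offsets.length)] using this

-- bSearch's result under the bisect_left loop invariant, given a sorted list
theorem bSearch_spec (offsets : List Int) (offset : Int)
    (hs : List.Pairwise (· ≤ ·) offsets) :
    ∀ (fuel lo hi : Nat), hi - lo ≤ fuel → lo ≤ hi → hi ≤ offsets.length →
    (∀ i, i < lo → offsets.getD i 0 < offset) →
    (∀ i, hi ≤ i → i < offsets.length → ¬ offsets.getD i 0 < offset) →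
    bSearch offsets offset lo hi fuel ≤ offsets.length ∧
    (∀ i, i < bSearch offsets offset lo hi fuel → offsets.getD i 0 < offset) ∧
    (bSearch offsets offset lo hi fuel < offsets.length →
      ¬ offsets.getD (bSearch offsets offset lo hi fuel) 0 < offset) := by
  intro fuel
  induction fuel with
  | zero =>
    intro lo hi hf hb hhl hlo hhi
    simp only [bSearch]
    have : lo = hi := by omega
    subst this
    refine ⟨by omega, fun i hi' => hlo i hi', fun hr => hhi lo (le_refl _) hr⟩
  | succ fuel ih =>
    intro lo hi hf hb hhl hlo hhi
    simp only [bSearch]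
    split_ifs with h1 h2
    · apply ih ((lo + hi) / 2 + 1) hi (by omega) (by omega) hhl _ hhi
      intro i hi'
      rcases Nat.lt_succ_iff_lt_or_eq.mp hi' with h' | rfl
      · rcases Nat.lt_or_ge i lo with h'' | h''
        · exact hlo i h''
        · exact lt_of_le_of_lt (sorted_getD hs (by omega) (by omega)) h2
      · exact h2
    · apply ih lo ((lo + hi) / 2) (by omega) (by omega) (by omega) hlo
      intro i hi1 hi2 hc
      exact h2 (lt_of_le_of_lt (sorted_getD hs hi1 hi2) hc)
    · refine ⟨by omega, fun i hi' => hlo i hi', fun hr => hhi lo (by omega) hr⟩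

-- membership phrased as an index fact
theorem forall_mem_iff_getD (offsets : List Int) (P : Int → Prop) :
    (∀ v ∈ offsets, P v) ↔ (∀ i, i < offsets.length → P (offsets.getD i 0)) := by
  constructor
  · intro h i hi
    have : offsets.getD i 0 = offsets[i] := by
      simp [List.getD_eq_getElem?_getD, hi]
    rw [this]
    exact h _ (List.getElem_mem hi)
  · intro h v hv
    obtain ⟨i, hi, rfl⟩ := List.mem_iff_getElem.mp hv
    have : offsets[i] = offsets.getD i 0 := by
      simp [List.getD_eq_getElem?_getD, hi]
    rw [this]
    exact h i hi

-- all entries ≥ offset: the linear scan stops immediately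
theorem aScan_of_ge (offsets : List Int) (offset : Int)
    (h : ∀ i, i < offsets.length → ¬ offsets.getD i 0 < offset) (fuel : Nat) :
    aScan offsets offset 0 fuel = 0 := by
  cases fuel with
  | zero => rfl
  | succ fuel =>
    simp only [aScan]
    split_ifs with h1 h2
    · exact absurd h2 (h 0 h1)
    · rfl
    · rfl

-- all entries ≥ offset: the binary search always moves hi down to lo
theorem bSearch_of_ge (offsets : List Int) (offset : Int)
    (h : ∀ i, i < offsets.length → ¬ offsets.getD i 0 < offset) :
    ∀ (fuel lo hi : Nat), hi ≤ offsets.length →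
    bSearch offsets offset lo hi fuel = lo := by
  intro fuel
  induction fuel with
  | zero => intro lo hi _; rfl
  | succ fuel ih =>
    intro lo hi hhl
    simp only [bSearch]
    split_ifs with h1 h2
    · exact absurd h2 (h _ (by omega))
    · exact ih lo ((lo + hi) / 2) (by omega)
    · rfl

-- all entries < offset: the linear scan runs off the end of the list
theorem aScan_of_lt (offsets : List Int) (offset : Int)
    (h : ∀ i, i < offsets.length → offsets.getD i 0 < offset) :
    ∀ (fuel line : Nat), offsets.length ≤ line + fuel → line ≤ offsets.length →
    aScan offsets offset line fuel = offsets.length := by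
  intro fuel
  induction fuel with
  | zero =>
    intro line hf hl
    simp only [aScan]
    omega
  | succ fuel ih =>
    intro line hf hl
    simp only [aScan]
    split_ifs with h1 h2
    · exact ih (line + 1) (by omega) (by omega)
    · exact absurd (h line h1) h2
    · omega

-- all entries < offset: the binary search always moves lo up to hi
theorem bSearch_of_lt (offsets : List Int) (offset : Int)
    (h : ∀ i, i < offsets.length → offsets.getD i 0 < offset) :
    ∀ (fuel lo hi : Nat), hi - lo ≤ fuel → lo ≤ hi → hi ≤ offsets.length →
    bSearch offsets offset lo hi fuel = hi := by
  intro fuel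
  induction fuel with
  | zero =>
    intro lo hi hf hb _
    simp only [bSearch]
    omega
  | succ fuel ih =>
    intro lo hi hf hb hhl
    simp only [bSearch]
    split_ifs with h1 h2
    · exact ih ((lo + hi) / 2 + 1) hi (by omega) (by omega) hhl
    · exact absurd (h _ (by omega)) h2
    · omega

theorem scan_eq_search (offsets : List Int) (offset : Int)
    (hpre : Pre_convert_offset_to_line_col_py offsets offset) :
    aScan offsets offset 0 offsets.length = bSearch offsets offset 0 offsets.length offsets.length := by
  rcases hpre with hs | hge | hlt
  · obtain ⟨-, a2, a3, a4⟩ := aScan_spec offsets offset offsets.length 0 (by omega)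
    obtain ⟨b1, b2, b3⟩ := bSearch_spec offsets offset hs offsets.length 0 offsets.length
      (by omega) (Nat.zero_le _) (le_refl _) (by omega) (by omega)
    simp only [Nat.max_eq_right (Nat.zero_le _)] at a2
    set ra := aScan offsets offset 0 offsets.length
    set rb := bSearch offsets offset 0 offsets.length offsets.length
    by_contra hne
    rcases Nat.lt_or_ge ra rb with h | h
    · exact (a4 (by omega)) (b2 ra h)
    · exact (b3 (by omega)) (a3 rb (Nat.zero_le _) (by omega))
  · have h := fun i hi => not_lt.mpr ((forall_mem_iff_getD offsets (offset ≤ ·)).mp hge i hi)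
    rw [aScan_of_ge offsets offset h, bSearch_of_ge offsets offset h _ _ _ (le_refl _)]
  · have h := (forall_mem_iff_getD offsets (· < offset)).mp hlt
    rw [aScan_of_lt offsets offset h _ _ (by omega) (by omega),
      bSearch_of_lt offsets offset h _ _ _ (by omega) (Nat.zero_le _) (le_refl _)]

-- ===== VERDICT (by name: the statement is the Claim_ definition above) =====
theorem convert_offset_to_line_col_py_spec : Claim_equal_convert_offset_to_line_col_py := by
  intro offsets offset _ hpre
  unfold Spec_convert_offset_to_line_col_py
  unfold convert_offset_to_line_col_py convert_offset_to_line_col_py_alt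
  rw [scan_eq_search offsets offset hpre]
  set r := bSearch offsets offset 0 offsets.length offsets.length with hr
  by_cases h : 0 < r
  · have h1 : ((r : Int) > 0) := by exact_mod_cast h
    simp only [if_pos h1, if_pos h, Int.toNat_natCast]
  · have h0 : r = 0 := by omega
    simp [h0]
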